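-- pv_equiv track=rewrite | github.com/iceout/aidd-plugin | runtime/skills/aidd-flow-state/tasklist_check.py | large_code_fence_without_report
-- ===== SOURCE A (Python) =====
-- def large_code_fence_without_report(lines: list[str]) -> bool:
--     in_fence = False
--     fence_lines: list[int] = []
--     start_idx = 0
--     for idx, line in enumerate(lines):
--         if line.strip().startswith("```"):
--             if not in_fence:
--                 in_fence = True
--                 fence_lines = []
--                 start_idx = idx
--             else:
--                 in_fence = False
--                 if len(fence_lines) > 20 and not find_report_link_near(lines, start_idx):
--                     return True
--             continue
--         if in_fence:
--             fence_lines.append(idx)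
--     return False
--
-- def find_report_link_near(lines: list[str], idx: int, window: int = 5) -> bool:
--     start = max(0, idx - window)
--     end = min(len(lines), idx + window + 1)
--     for line in lines[start:end]:
--         if "aidd/reports/" in line:
--             return True
--     return False
-- ===== SOURCE B (Python) =====
-- def large_code_fence_without_report(lines: list[str]) -> bool:
--     markers = [i for i, line in enumerate(lines) if line.strip().startswith("```")]
--     for k in range(0, len(markers) - 1, 2):
--         open_i, close_i = markers[k], markers[k + 1]
--         if close_i - open_i - 1 > 20 and not find_report_link_near(lines, open_i):
--             return True
--     return False
--
-- def find_report_link_near(lines: list[str], idx: int, window: int = 5) -> bool: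
--     start = max(0, idx - window)
--     end = min(len(lines), idx + window + 1)
--     for line in lines[start:end]:
--         if "aidd/reports/" in line:
--             return True
--     return False
-- ===== Notes on version B (the rewrite author's own statement) =====
-- stated objective: alternative
-- what changed: Replaced A's single-pass state machine (in_fence flag, accumulated fence_lines list, start_idx) by a two-pass decomposition: first collect all fence-marker indices, then scan consecutive marker pairs and test the gap size close_i - open_i - 1 > 20 directly.
import Mathlib
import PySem

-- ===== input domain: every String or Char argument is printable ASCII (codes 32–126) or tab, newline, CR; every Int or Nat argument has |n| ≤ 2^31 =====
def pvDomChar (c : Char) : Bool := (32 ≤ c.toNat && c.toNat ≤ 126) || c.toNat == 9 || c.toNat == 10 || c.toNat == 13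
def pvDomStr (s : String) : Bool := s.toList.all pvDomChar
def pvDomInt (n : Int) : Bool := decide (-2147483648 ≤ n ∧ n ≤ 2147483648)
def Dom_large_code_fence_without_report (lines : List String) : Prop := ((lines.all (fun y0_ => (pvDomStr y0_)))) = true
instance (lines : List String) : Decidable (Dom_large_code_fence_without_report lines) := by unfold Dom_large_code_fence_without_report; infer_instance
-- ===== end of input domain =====

-- B replaces A's single-pass state machine by a marker-index list plus a pair scan (alternative decomposition, same cost).

-- ===== PORT A =====
-- helper shared by both ports: Python find_report_link_near (identical in A and B)
def find_report_link_near (lines : List String) (idx : Int) (window : Int) : Bool :=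
  let start := max 0 (idx - window)
  let stop := min (lines.length : Int) (idx + window + 1)
  (PySem.List.slice lines (some start) (some stop)).any (fun line => PySem.Str.isIn "aidd/reports/" line)

-- line.strip().startswith("```")
def pvIsFence (line : String) : Bool := PySem.Str.startswith (PySem.Str.strip line) "```"

-- A's for-loop over enumerate(lines) with state (in_fence, fence_lines, start_idx)
def pvALoop (all : List String) : List (Int × String) → Bool → List Int → Int → Bool
  | [], _, _, _ => false
  | (idx, line) :: rest, in_fence, fence_lines, start_idx =>
    if pvIsFence line then
      if !in_fence then
        pvALoop all rest true [] idx
      else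
        if 20 < fence_lines.length ∧ find_report_link_near all start_idx 5 = false then
          true
        else
          pvALoop all rest false fence_lines start_idx
    else
      if in_fence then
        pvALoop all rest in_fence (fence_lines ++ [idx]) start_idx
      else
        pvALoop all rest in_fence fence_lines start_idx

def large_code_fence_without_report (lines : List String) : Bool :=
  pvALoop lines (PySem.List.enumerate lines 0) false [] 0

-- ===== PORT B =====
-- markers = [i for i, line in enumerate(lines) if line.strip().startswith("```")]
def pvMarkers (lines : List String) (i : Int) : List Int :=
  (PySem.List.enumerate lines i).filterMap (fun p => if pvIsFence p.2 then some p.1 else none)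

-- the for-k loop over consecutive marker pairs (a trailing unpaired marker is ignored)
def pvPairScan (all : List String) : List Int → Bool
  | o :: c :: rest =>
    if 20 < c - o - 1 ∧ find_report_link_near all o 5 = false then true
    else pvPairScan all rest
  | _ => false

def large_code_fence_without_report_alt (lines : List String) : Bool :=
  pvPairScan lines (pvMarkers lines 0)

-- ===== PRECONDITION & SPEC =====
def Spec_large_code_fence_without_report (lines : List String) (out : Bool) : Prop := out = large_code_fence_without_report_alt lines
instance (lines : List String) (out : Bool) : Decidable (Spec_large_code_fence_without_report lines out) := by unfold Spec_large_code_fence_without_report; infer_instance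

-- ===== CLAIM (what is proved, stated in full; the proofs are below) =====
def Claim_equal_large_code_fence_without_report : Prop := ∀ (lines : List String), Dom_large_code_fence_without_report lines → Spec_large_code_fence_without_report lines (large_code_fence_without_report lines)

-- ===== LEMMAS AND PROOFS =====

theorem pvMarkers_cons (x : String) (l : List String) (i : Int) :
    pvMarkers (x :: l) i = (if pvIsFence x then [i] else []) ++ pvMarkers l (i + 1) := by
  by_cases h : pvIsFence x <;>
    simp [pvMarkers, PySem.List.enumerate_cons, h]

theorem pvALoop_fence_false (all : List String) (idx : Int) (line : String) (rest : List (Int × String))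
    (fl : List Int) (s : Int) (h : pvIsFence line = true) :
    pvALoop all ((idx, line) :: rest) false fl s = pvALoop all rest true [] idx := by
  simp [pvALoop, h]

theorem pvALoop_fence_true (all : List String) (idx : Int) (line : String) (rest : List (Int × String))
    (fl : List Int) (s : Int) (h : pvIsFence line = true) :
    pvALoop all ((idx, line) :: rest) true fl s =
      if 20 < fl.length ∧ find_report_link_near all s 5 = false then true
      else pvALoop all rest false fl s := by
  simp [pvALoop, h]

theorem pvALoop_plain (all : List String) (idx : Int) (line : String) (rest : List (Int × String))
    (b : Bool) (fl : List Int) (s : Int) (h : pvIsFence line = false) :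
    pvALoop all ((idx, line) :: rest) b fl s =
      pvALoop all rest b (if b then fl ++ [idx] else fl) s := by
  cases b <;> simp [pvALoop, h]

-- the combined invariant: A's loop on the suffix starting at index i, in both states,
-- computes the pair scan over the markers of that suffix
theorem pvLoop_eq (all : List String) (l : List String) : ∀ (i : Int),
    (∀ (fl : List Int) (s : Int),
      pvALoop all (PySem.List.enumerate l i) false fl s = pvPairScan all (pvMarkers l i)) ∧
    (∀ (fl : List Int) (s : Int),
      pvALoop all (PySem.List.enumerate l i) true fl s =
        match pvMarkers l i with
        | [] => false
        | c :: rest =>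
          if 20 < (fl.length : Int) + (c - i) - 1 + 1 ∧ find_report_link_near all s 5 = false then true
          else pvPairScan all rest) := by
  induction l with
  | nil =>
    intro i
    constructor <;> intro fl s <;>
      simp [PySem.List.enumerate_nil, pvALoop, pvMarkers, pvPairScan]
  | cons x l ih =>
    intro i
    rw [PySem.List.enumerate_cons]
    by_cases hx : pvIsFence x = true
    · constructor
      · intro fl s
        rw [pvALoop_fence_false all i x _ fl s hx, (ih (i + 1)).2 [] i,
            pvMarkers_cons x l i, if_pos hx]
        cases hm : pvMarkers l (i + 1) with
        | nil => simp [pvPairScan]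
        | cons c rest =>
          show _ = pvPairScan all (i :: c :: rest)
          simp only [pvPairScan, List.length_nil, Nat.cast_zero]
          exact if_congr (and_congr_left' (by omega)) rfl rfl
      · intro fl s
        rw [pvALoop_fence_true all i x _ fl s hx, (ih (i + 1)).1 fl s,
            pvMarkers_cons x l i, if_pos hx]
        show _ = if 20 < (fl.length : Int) + (i - i) - 1 + 1 ∧ _ then true else pvPairScan all (pvMarkers l (i + 1))
        exact if_congr (and_congr_left' (by omega)) rfl rfl
    · rw [Bool.not_eq_true] at hx
      constructor
      · intro fl s
        rw [pvALoop_plain all i x _ false fl s hx, pvMarkers_cons x l i]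
        simp only [hx, Bool.false_eq_true, if_false, List.nil_append]
        exact (ih (i + 1)).1 fl s
      · intro fl s
        rw [pvALoop_plain all i x _ true fl s hx, pvMarkers_cons x l i]
        simp only [hx, Bool.false_eq_true, if_false, if_true, List.nil_append]
        rw [(ih (i + 1)).2 (fl ++ [i]) s]
        cases hm : pvMarkers l (i + 1) with
        | nil => rfl
        | cons c rest =>
          simp only [List.length_append, List.length_cons, List.length_nil]
          exact if_congr (and_congr_left' (by push_cast; omega)) rfl rfl

-- ===== VERDICT (by name: the statement is the Claim_ definition above) =====
theorem large_code_fence_without_report_spec : Claim_equal_large_code_fence_without_report := by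
  intro lines _
  unfold Spec_large_code_fence_without_report large_code_fence_without_report large_code_fence_without_report_alt
  exact (pvLoop_eq lines lines 0).1 [] 0
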